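-- pv_equiv track=rewrite | github.com/wilmeroroxon/GestorNotas | Proyecto_gestor_de_notas.py | cursos_aprobados
-- ===== SOURCE A (Python) =====
-- def cursos_aprobados(lista):
--     aprobado = 0
--     reprobado = 0
--     for curso in lista:
--         estado = curso[2]
--         if estado == "Aprobado":
--             aprobado +=1
--         else:
--             reprobado +=1
--
--     return aprobado,reprobado
-- ===== SOURCE B (Python) =====
-- def cursos_aprobados(lista):
--     # Build a frequency table of all estado values, then read the two answers off it.
--     counts = {}
--     for curso in lista:
--         counts[curso[2]] = counts.get(curso[2], 0) + 1
--     aprobado = counts.get("Aprobado", 0)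
--     reprobado = sum(v for k, v in counts.items() if k != "Aprobado")
--     return aprobado, reprobado
-- ===== Notes on version B (the rewrite author's own statement) =====
-- stated objective: alternative
-- what changed: Instead of testing each course against "Aprobado" while looping, B builds a dict counting every distinct estado value, then reads aprobado as the table entry for "Aprobado" and reprobado as the sum of all other entries.
import Mathlib
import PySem

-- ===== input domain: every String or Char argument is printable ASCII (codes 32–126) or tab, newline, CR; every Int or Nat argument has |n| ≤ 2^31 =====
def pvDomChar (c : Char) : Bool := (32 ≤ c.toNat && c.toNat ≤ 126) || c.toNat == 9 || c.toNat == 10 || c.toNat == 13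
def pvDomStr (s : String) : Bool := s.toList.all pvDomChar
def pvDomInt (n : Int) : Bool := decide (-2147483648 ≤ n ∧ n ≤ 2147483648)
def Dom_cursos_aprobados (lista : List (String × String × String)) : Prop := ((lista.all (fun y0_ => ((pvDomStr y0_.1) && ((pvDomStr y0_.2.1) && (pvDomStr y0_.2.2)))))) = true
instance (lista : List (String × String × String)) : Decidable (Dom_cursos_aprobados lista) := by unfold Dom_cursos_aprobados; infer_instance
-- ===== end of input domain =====

-- B replaces the two-accumulator loop by a frequency dict of estado values read off afterwards (alternative decomposition, same cost).


-- ===== PORT A =====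
def cursos_aprobados (lista : List (String × String × String)) : Int × Int :=
  -- for curso in lista: estado = curso[2]; if estado == "Aprobado": aprobado += 1 else reprobado += 1
  let st := lista.foldl (fun (acc : Int × Int) curso =>
    let estado := curso.2.2
    if estado == "Aprobado" then (acc.1 + 1, acc.2) else (acc.1, acc.2 + 1)) (0, 0)
  st

-- ===== PORT B =====
-- counts = {}; for curso: counts[curso[2]] = counts.get(curso[2],0)+1; then read "Aprobado" and sum the rest
def cursos_aprobados_alt (lista : List (String × String × String)) : Int × Int :=
  let counts := lista.foldl (fun (d : PySem.Dict String Int) curso =>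
    d.insert curso.2.2 (d.getD curso.2.2 0 + 1)) PySem.Dict.empty
  let aprobado := counts.getD "Aprobado" 0
  let reprobado := ((counts.items.filter (fun p => p.1 != "Aprobado")).map (·.2)).foldl (· + ·) 0
  (aprobado, reprobado)

-- ===== PRECONDITION & SPEC =====
def Spec_cursos_aprobados (lista : List (String × String × String)) (out : Int × Int) : Prop := out = cursos_aprobados_alt lista
instance (lista : List (String × String × String)) (out : Int × Int) : Decidable (Spec_cursos_aprobados lista out) := by unfold Spec_cursos_aprobados; infer_instance

-- ===== CLAIM (what is proved, stated in full; the proofs are below) =====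
def Claim_equal_cursos_aprobados : Prop := ∀ (lista : List (String × String × String)), Dom_cursos_aprobados lista → Spec_cursos_aprobados lista (cursos_aprobados lista)

-- ===== LEMMAS AND PROOFS =====

theorem fold_eq (lista : List (String × String × String)) (a r : Int) :
    lista.foldl (fun (acc : Int × Int) curso =>
      let estado := curso.2.2
      if estado == "Aprobado" then (acc.1 + 1, acc.2) else (acc.1, acc.2 + 1)) (a, r)
    = (a + (((lista.map (·.2.2)).count "Aprobado" : Nat) : Int),
       r + ((lista.length : Int) - (((lista.map (·.2.2)).count "Aprobado" : Nat) : Int))) := by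
  induction lista generalizing a r with
  | nil => simp
  | cons hd tl ih =>
    simp only [List.foldl_cons, List.map_cons, List.length_cons, List.count_cons]
    by_cases h : hd.2.2 == "Aprobado"
    · simp only [h, if_pos]
      rw [ih]
      have : hd.2.2 = "Aprobado" := by simpa using h
      simp [Prod.ext_iff]; omega
    · simp only [h, if_neg, Bool.false_eq_true, not_false_iff]
      rw [ih]
      have : ¬ (hd.2.2 = "Aprobado") := by simpa using h
      simp [Prod.ext_iff]; omega

-- sum of an Int list by foldl
theorem foldl_add_sum (l : List Int) (s : Int) : l.foldl (· + ·) s = s + l.sum := by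
  induction l generalizing s with
  | nil => simp
  | cons x t ih => simp [List.foldl_cons, ih]; ring

-- distinct estados of PySem and Mathlib are permutations of each other
theorem ofList_perm_dedup (es : List String) : (PySem.Set.ofList es : List String).Perm es.dedup := by
  apply (List.perm_ext_iff_of_nodup (PySem.Set.nodup_ofList es) es.nodup_dedup).mpr
  intro x
  simp [PySem.Set.mem_ofList, List.mem_dedup]

theorem sum_rest (es : List String) :
    ((((PySem.Set.ofList es).map (fun k => (k, (es.count k : Int)))).filter
        (fun p => p.1 != "Aprobado")).map (·.2)).sum
      = ((es.length : Int) - ((es.count "Aprobado" : Nat) : Int)) := by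
  have hperm : ((((PySem.Set.ofList es).map (fun k => (k, (es.count k : Int)))).filter
        (fun p => p.1 != "Aprobado")).map (·.2)).Perm
      ((((es.dedup).map (fun k => (k, (es.count k : Int)))).filter
        (fun p => p.1 != "Aprobado")).map (·.2)) :=
    ((((ofList_perm_dedup es).map _).filter _).map _)
  rw [hperm.sum_eq]
  rw [List.filter_map, List.map_map]
  simp only [Function.comp_def]
  have h1 : ((es.dedup.filter (fun k => k != "Aprobado")).map (fun k => (es.count k : Int))).sum
      = (((es.dedup.filter (fun k => k != "Aprobado")).map (fun k => es.count k)).sum : Nat) := by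
    simp [List.map_map]
    induction (es.dedup.filter (fun k => k != "Aprobado")) with
    | nil => simp
    | cons x t ih => simp [ih]
  rw [h1]
  rw [List.sum_map_count_dedup_filter_eq_countP (fun k => k != "Aprobado") es]
  have h2 : es.countP (fun k => k != "Aprobado") + es.count "Aprobado" = es.length := by
    have := List.length_eq_countP_add_countP (fun k => k != "Aprobado") (l := es)
    have hc : es.countP (fun k => ¬ (k != "Aprobado") = true) = es.count "Aprobado" := by
      apply List.countP_congr
      intro x _
      simp
    omega
  omega

theorem cursos_aprobados_spec : Claim_equal_cursos_aprobados := by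
  intro lista _
  show cursos_aprobados lista = cursos_aprobados_alt lista
  unfold cursos_aprobados cursos_aprobados_alt
  have hcounter : lista.foldl (fun (d : PySem.Dict String Int) curso =>
      d.insert curso.2.2 (d.getD curso.2.2 0 + 1)) PySem.Dict.empty
      = PySem.Dict.counter (lista.map (·.2.2)) := by
    rw [← PySem.Dict.foldl_insert_getD_add_one_eq_counter, List.foldl_map]
  simp only [hcounter, PySem.Dict.getD_counter, PySem.Dict.items_counter]
  rw [fold_eq]
  rw [foldl_add_sum]
  rw [sum_rest (lista.map (·.2.2))]
  simp
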